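-- pv_equiv track=rewrite | github.com/ItayXD/imagenet_specialization | scripts/download_imagenet_hf.py | _build_folder_names
-- ===== SOURCE A (Python) =====
-- from collections.abc import Iterable
--
-- def _sanitize_label_name(name: str) -> str:
--     out = name.lower()
--     out = out.replace('/', '_')
--     out = out.replace(' ', '_')
--     out = out.replace(',', '_')
--     out = out.replace('-', '_')
--     out = out.replace('(', '')
--     out = out.replace(')', '')
--     return ''.join(ch for ch in out if ch.isalnum() or ch == '_')
--
-- def _build_folder_names(label_names: Iterable[str]) -> list[str]:
--     folder_names: list[str] = []
--     for idx, label_name in enumerate(label_names):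
--         sanitized = _sanitize_label_name(label_name)
--         if not sanitized:
--             sanitized = f'class_{idx:04d}'
--         folder_names.append(f'class_{idx:04d}__{sanitized}')
--     return folder_names
-- ===== SOURCE B (Python) =====
-- def _sanitize_label_name(name: str) -> str:
--     pieces = []
--     for ch in name.lower():
--         if ch in '/ ,-':
--             pieces.append('_')
--         elif ch == '_' or ch.isalnum():
--             pieces.append(ch)
--     return ''.join(pieces)
--
--
-- def _folder_name(idx: int, name: str) -> str:
--     tag = f'class_{idx:04d}'
--     return f'{tag}__{_sanitize_label_name(name) or tag}'
--
--
-- def _build_folder_names(label_names) -> list: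
--     return [_folder_name(idx, name) for idx, name in enumerate(label_names)]
-- ===== Notes on version B (the rewrite author's own statement) =====
-- stated objective: simpler
-- what changed: The sanitizer's six sequential str.replace scans plus a trailing filter comprehension are replaced by a single classification pass over the lowered string, and the outer loop becomes a list comprehension over a per-item helper.
import Mathlib
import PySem

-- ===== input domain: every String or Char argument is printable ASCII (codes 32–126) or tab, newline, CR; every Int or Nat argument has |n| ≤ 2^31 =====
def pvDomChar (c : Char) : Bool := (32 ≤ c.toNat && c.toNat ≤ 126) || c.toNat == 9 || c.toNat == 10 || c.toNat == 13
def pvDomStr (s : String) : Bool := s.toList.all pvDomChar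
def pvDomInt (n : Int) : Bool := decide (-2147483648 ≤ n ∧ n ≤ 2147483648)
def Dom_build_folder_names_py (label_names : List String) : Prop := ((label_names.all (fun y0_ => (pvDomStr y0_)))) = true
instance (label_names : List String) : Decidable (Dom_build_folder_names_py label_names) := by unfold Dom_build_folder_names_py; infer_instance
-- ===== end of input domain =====

-- B replaces A's six sequential str.replace scans plus a trailing filter by one
-- classification pass over the lowered string (objective: simpler, one pass).

-- f'class_{idx:04d}' ported by hand: decimal digits zero-padded to width 4, sign in
-- front (exact: Chars.zfill keeps the sign in front like Python's '0d' padding).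
def pvTag (idx : Int) : String :=
  "class_" ++ String.ofList (PySem.Chars.zfill (PySem.Int.toChars idx) 4)

-- ===== PORT A =====
def sanitizeA (name : String) : String :=
  let out := PySem.Str.lower name
  let out := PySem.Str.replace out "/" "_"
  let out := PySem.Str.replace out " " "_"
  let out := PySem.Str.replace out "," "_"
  let out := PySem.Str.replace out "-" "_"
  let out := PySem.Str.replace out "(" ""
  let out := PySem.Str.replace out ")" ""
  String.ofList (out.toList.filter (fun c => PySem.Chars.isalnum c || c == '_'))

def build_folder_names_py (label_names : List String) : List String :=
  (PySem.List.enumerate label_names 0).foldl (fun folder_names p =>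
    let sanitized := sanitizeA p.2
    let sanitized := if sanitized = "" then pvTag p.1 else sanitized
    folder_names ++ [pvTag p.1 ++ "__" ++ sanitized]) []

-- ===== PORT B =====
def sanitizeAlt (name : String) : String :=
  String.ofList ((PySem.Chars.lower name.toList).foldl (fun pieces c =>
    if c == '/' || c == ' ' || c == ',' || c == '-' then pieces ++ ['_']
    else if c == '_' || PySem.Chars.isalnum c then pieces ++ [c]
    else pieces) [])

def folderNameAlt (idx : Int) (name : String) : String :=
  let tag := pvTag idx
  tag ++ "__" ++ (if sanitizeAlt name = "" then tag else sanitizeAlt name)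

def build_folder_names_py_alt (label_names : List String) : List String :=
  (PySem.List.enumerate label_names 0).map (fun p => folderNameAlt p.1 p.2)

-- ===== PRECONDITION & SPEC =====
def Spec_build_folder_names_py (label_names : List String) (out : List String) : Prop := out = build_folder_names_py_alt label_names
instance (label_names : List String) (out : List String) : Decidable (Spec_build_folder_names_py label_names out) := by unfold Spec_build_folder_names_py; infer_instance

-- ===== CLAIM (what is proved, stated in full; the proofs are below) =====
def Claim_equal_build_folder_names_py : Prop := ∀ (label_names : List String), Dom_build_folder_names_py label_names → Spec_build_folder_names_py label_names (build_folder_names_py label_names)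

-- ===== LEMMAS AND PROOFS =====

-- single-character replace is a flatMap
theorem replace_go_single (a : Char) (new : List Char) :
    ∀ (s : List Char) (fuel : Nat) (acc : List Char), s.length ≤ fuel →
      PySem.Chars.replace.go [a] new fuel s acc
        = acc.reverse ++ s.flatMap (fun c => if c = a then new else [c]) := by
  intro s
  induction s with
  | nil =>
    intro fuel acc _
    rw [PySem.Chars.replace.go.eq_def]
    cases fuel <;> simp
  | cons c t ih =>
    intro fuel acc h
    cases fuel with
    | zero => simp at h
    | succ n =>
      rw [PySem.Chars.replace.go.eq_def]
      simp only [List.length_cons, Nat.add_le_add_iff_right] at h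
      by_cases hc : c = a
      · subst hc
        have hpre : [c].isPrefixOf (c :: t) = true := by simp [List.isPrefixOf]
        simp only [hpre, if_pos, List.length_cons, List.length_nil, List.drop_succ_cons,
          List.drop_zero]
        rw [ih n (new.reverse ++ acc) h]
        simp
      · have hpre : [a].isPrefixOf (c :: t) = false := by
          simp [List.isPrefixOf]
          exact fun h' => hc h'.symm
        simp only [hpre, Bool.false_eq_true, if_neg, not_false_iff]
        rw [ih n (c :: acc) h]
        simp [hc]

theorem replace_single (s : List Char) (a : Char) (new : List Char) :
    PySem.Chars.replace s [a] new = s.flatMap (fun c => if c = a then new else [c]) := by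
  rw [PySem.Chars.replace]
  simp only [List.isEmpty_cons, Bool.false_eq_true, if_neg, not_false_iff]
  simpa using replace_go_single a new s s.length [] (le_refl _)

-- the per-character classification B performs
def pvClassify (c : Char) : List Char :=
  if c == '/' || c == ' ' || c == ',' || c == '-' then ['_']
  else if c == '_' || PySem.Chars.isalnum c then [c]
  else []

theorem chain_eq (l : List Char) :
    List.filter (fun c => PySem.Chars.isalnum c || c == '_')
      ((((((l.flatMap (fun c => if c = '/' then ['_'] else [c])).flatMap
            (fun c => if c = ' ' then ['_'] else [c])).flatMap
            (fun c => if c = ',' then ['_'] else [c])).flatMap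
            (fun c => if c = '-' then ['_'] else [c])).flatMap
            (fun c => if c = '(' then [] else [c])).flatMap
            (fun c => if c = ')' then [] else [c]))
      = l.flatMap pvClassify := by
  induction l with
  | nil => simp
  | cons c t ih =>
    simp only [List.flatMap_cons, List.flatMap_append, List.filter_append, ih]
    congr 1
    by_cases h1 : c = '/' ; · subst h1; decide
    by_cases h2 : c = ' ' ; · subst h2; decide
    by_cases h3 : c = ',' ; · subst h3; decide
    by_cases h4 : c = '-' ; · subst h4; decide
    by_cases h5 : c = '(' ; · subst h5; decide
    by_cases h6 : c = ')' ; · subst h6; decide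
    simp only [List.flatMap_cons, List.flatMap_nil, if_neg h1, if_neg h2, if_neg h3,
      if_neg h4, if_neg h5, if_neg h6, List.append_nil, pvClassify]
    have hb1 : (c == '/' || c == ' ' || c == ',' || c == '-') = false := by
      simp [h1, h2, h3, h4]
    simp only [hb1, Bool.false_eq_true, if_neg, not_false_iff, List.filter_cons,
      List.filter_nil]
    cases PySem.Chars.isalnum c <;> cases hu : (c == '_') <;> simp [hu]

theorem sanitize_eq (s : String) : sanitizeA s = sanitizeAlt s := by
  unfold sanitizeA sanitizeAlt
  have hfold : ∀ (l : List Char) (acc : List Char),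
      l.foldl (fun pieces c =>
        if c == '/' || c == ' ' || c == ',' || c == '-' then pieces ++ ['_']
        else if c == '_' || PySem.Chars.isalnum c then pieces ++ [c]
        else pieces) acc = acc ++ l.flatMap pvClassify := by
    intro l acc
    rw [show (fun (pieces : List Char) (c : Char) =>
        if c == '/' || c == ' ' || c == ',' || c == '-' then pieces ++ ['_']
        else if c == '_' || PySem.Chars.isalnum c then pieces ++ [c]
        else pieces) = (fun pieces c => pieces ++ pvClassify c) by
      funext pieces c
      unfold pvClassify
      split_ifs <;> simp]
    exact PySem.List.foldl_append_eq_flatMap pvClassify l acc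
  rw [hfold]
  refine congrArg String.ofList ?_
  simp only [PySem.Str.toList_replace, PySem.Str.toList_lower, List.nil_append]
  have : ∀ (t : List Char) (a : Char) (nw : List Char),
      PySem.Chars.replace t [a] nw = t.flatMap (fun c => if c = a then nw else [c]) :=
    replace_single
  rw [show ("/" : String).toList = ['/'] from rfl, show ("_" : String).toList = ['_'] from rfl,
    show (" " : String).toList = [' '] from rfl, show ("," : String).toList = [','] from rfl,
    show ("-" : String).toList = ['-'] from rfl, show ("(" : String).toList = ['('] from rfl,
    show (")" : String).toList = [')'] from rfl, show ("" : String).toList = [] from rfl]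
  rw [this, this, this, this, this, this]
  exact chain_eq _

-- ===== VERDICT (by name: the statement is the Claim_ definition above) =====
theorem foldA_eq_map (l : List (Int × String)) (acc : List String) :
    l.foldl (fun folder_names p =>
      let sanitized := sanitizeA p.2
      let sanitized := if sanitized = "" then pvTag p.1 else sanitized
      folder_names ++ [pvTag p.1 ++ "__" ++ sanitized]) acc
    = acc ++ l.map (fun p => folderNameAlt p.1 p.2) := by
  induction l generalizing acc with
  | nil => simp
  | cons p t ih =>
    simp only [List.foldl_cons, List.map_cons, ih]
    simp only [folderNameAlt, sanitize_eq]
    simp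

theorem build_folder_names_py_spec : Claim_equal_build_folder_names_py := by
  intro label_names _
  unfold Spec_build_folder_names_py build_folder_names_py build_folder_names_py_alt
  rw [foldA_eq_map]
  simp
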